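-- pv_equiv track=rewrite | github.com/muchiny/mcp-ssh-bridge | scripts/migrate_handler.py | insert_use_import
-- ===== SOURCE A (Python) =====
-- def insert_use_import(text: str, shape: str) -> str:
--     """
--     Insert `use crate::mcp_tool;` or `use crate::mcp_standard_tool;`
--     at TOP-LEVEL scope only — never inside a nested `mod tests { … }`
--     which would put the import out of reach of the `#[mcp_tool]`
--     attribute above the struct.
--
--     Strategy: walk lines from the top of the file. Track brace depth
--     to stay at scope 0. As soon as we see the first `use crate::`
--     line at depth 0, insert the new use before it (keeping imports
--     roughly grouped). If no such line exists, insert after the file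
--     header comments / module docs.
--
--     Idempotent: no-op if the import line already exists at any
--     position (even inside a nested mod — that still satisfies Rust).
--     """
--     macro_name = "mcp_standard_tool" if shape == "standard" else "mcp_tool"
--     needed = f"use crate::{macro_name};"
--
--     # Short-circuit: already present (at any scope level).
--     for line in text.splitlines():
--         if line.strip() == needed:
--             return text
--
--     lines = text.splitlines(keepends=True)
--     depth = 0
--     first_top_level_use = None
--
--     for idx, line in enumerate(lines):
--         stripped = line.strip()
--
--         # Track brace depth on the line BEFORE we classify it, so
--         # `mod tests {` bumps depth before we check its content.
--         # We skip strings — this is a rough approximation but handler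
--         # files don't contain brace-heavy string literals at the
--         # top level.
--         line_depth_before = depth
--         for ch in line:
--             if ch == "{":
--                 depth += 1
--             elif ch == "}":
--                 depth -= 1
--
--         # Only consider lines that STARTED at depth 0.
--         if line_depth_before != 0:
--             continue
--
--         if stripped.startswith("use crate::"):
--             first_top_level_use = idx
--             break
--
--     if first_top_level_use is not None:
--         lines.insert(first_top_level_use, f"{needed}\n")
--         return "".join(lines)
--
--     # No top-level `use crate::` at all — find the first non-comment,
--     # non-attribute line at depth 0 and insert before it.
--     depth = 0
--     for idx, line in enumerate(lines):
--         stripped = line.strip()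
--         line_depth_before = depth
--         for ch in line:
--             if ch == "{":
--                 depth += 1
--             elif ch == "}":
--                 depth -= 1
--         if line_depth_before != 0:
--             continue
--         if (
--             stripped
--             and not stripped.startswith("//")
--             and not stripped.startswith("/*")
--             and not stripped.startswith("*")
--             and not stripped.startswith("#!")
--         ):
--             lines.insert(idx, f"{needed}\n\n")
--             return "".join(lines)
--
--     raise RuntimeError("cannot find an insertion point for the use import")
-- ===== SOURCE B (Python) =====
-- def insert_use_import(text: str, shape: str) -> str:
--     """Single-pass variant: one depth-tracking walk records both the first
--     top-level `use crate::` line and the first top-level insertable line."""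
--     macro_name = "mcp_standard_tool" if shape == "standard" else "mcp_tool"
--     needed = f"use crate::{macro_name};"
--
--     # Short-circuit: already present (at any scope level).
--     for line in text.splitlines():
--         if line.strip() == needed:
--             return text
--
--     lines = text.splitlines(keepends=True)
--     depth = 0
--     first_use = None
--     first_insert = None
--     for idx, line in enumerate(lines):
--         stripped = line.strip()
--         line_depth_before = depth
--         for ch in line:
--             if ch == "{":
--                 depth += 1
--             elif ch == "}":
--                 depth -= 1
--         if line_depth_before != 0:
--             continue
--         if first_use is None and stripped.startswith("use crate::"):
--             first_use = idx
--         if first_insert is None and stripped and not stripped.startswith(("//", "/*", "*", "#!")):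
--             first_insert = idx
--         if first_use is not None:
--             break
--
--     if first_use is not None:
--         lines.insert(first_use, f"{needed}\n")
--         return "".join(lines)
--     if first_insert is not None:
--         lines.insert(first_insert, f"{needed}\n\n")
--         return "".join(lines)
--     raise RuntimeError("cannot find an insertion point for the use import")
-- ===== Notes on version B (the rewrite author's own statement) =====
-- stated objective: faster
-- what changed: A's two sequential brace-depth walks over the lines (one searching for the first top-level 'use crate::' line, then a second full re-walk for the first top-level insertable line) are collapsed into a single depth-tracking pass that records both candidate indices at once, each set only once, breaking as soon as the use-line index is found.
import Mathlib
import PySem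

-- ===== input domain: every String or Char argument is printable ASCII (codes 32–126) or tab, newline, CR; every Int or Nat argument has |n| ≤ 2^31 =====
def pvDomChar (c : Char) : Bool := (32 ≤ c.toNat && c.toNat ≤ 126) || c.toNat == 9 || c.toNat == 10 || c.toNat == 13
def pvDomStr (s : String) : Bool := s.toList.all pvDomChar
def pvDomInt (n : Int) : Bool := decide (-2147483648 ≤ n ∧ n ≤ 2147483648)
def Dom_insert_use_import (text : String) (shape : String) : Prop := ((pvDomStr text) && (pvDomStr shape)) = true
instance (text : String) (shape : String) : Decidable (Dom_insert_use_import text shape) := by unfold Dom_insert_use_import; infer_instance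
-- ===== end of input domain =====

-- B collapses A's two sequential depth-tracking walks over the lines into a single pass that
-- records both candidate insertion indices at once; equivalence of return values is proved.

-- ===== shared helpers (both Pythons compute these identical sub-expressions) =====

-- needed = f"use crate::{macro_name};" with macro_name chosen from shape
def pvNeeded (shape : String) : List Char :=
  ("use crate::" ++ (if shape = "standard" then "mcp_standard_tool" else "mcp_tool") ++ ";").toList

-- the char-by-char brace walk 'for ch in line: if ch=="{": depth+=1 elif ch=="}": depth-=1'
def pvBrace (line : List Char) (depth : Int) : Int :=
  line.foldl (fun d ch => if ch = '{' then d + 1 else if ch = '}' then d - 1 else d) depth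

-- text.splitlines(keepends=True), hand-ported (PySem has only the keepends=False form).
-- Exact on the Dom alphabet: the only line breaks that can occur there are '\n', '\r' and '\r\n'
-- (the other Python break characters \v \f \x1c-\x1e \x85 \u2028 \u2029 lie outside Dom).
def pvSplitKeep : List Char → List Char → List (List Char)
  | [], acc => if acc.isEmpty then [] else [acc.reverse]
  | '\r' :: '\n' :: rest, acc => (acc.reverse ++ ['\r', '\n']) :: pvSplitKeep rest []
  | c :: rest, acc =>
      if c = '\n' ∨ c = '\r' then (acc.reverse ++ [c]) :: pvSplitKeep rest []
      else pvSplitKeep rest (c :: acc)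

-- stripped.startswith("use crate::") — the prefix, named so both ports share the literal
def pvUseCrate : List Char := "use crate::".toList

-- 'stripped and not stripped.startswith(("//", "/*", "*", "#!"))' — the insertion-point test,
-- textually identical in A's second loop and in B's single pass
def pvInsertable (s : List Char) : Bool :=
  !s.isEmpty && !PySem.Chars.startswith s ['/', '/'] && !PySem.Chars.startswith s ['/', '*']
    && !PySem.Chars.startswith s ['*'] && !PySem.Chars.startswith s ['#', '!']

-- ===== PORT A =====

-- A's first depth-walk: break on the first line starting at depth 0 whose strip startswith "use crate::"
def pvFindUseA : List (List Char) → Nat → Int → Option Nat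
  | [], _, _ => none
  | line :: rest, idx, depth =>
      let stripped := PySem.Chars.strip line
      let d' := pvBrace line depth
      if depth ≠ 0 then pvFindUseA rest (idx + 1) d'
      else if PySem.Chars.startswith stripped pvUseCrate then some idx
      else pvFindUseA rest (idx + 1) d'

-- A's second depth-walk (depth restarts at 0): first insertable line starting at depth 0
def pvFindInsA : List (List Char) → Nat → Int → Option Nat
  | [], _, _ => none
  | line :: rest, idx, depth =>
      let stripped := PySem.Chars.strip line
      let d' := pvBrace line depth
      if depth ≠ 0 then pvFindInsA rest (idx + 1) d'
      else if pvInsertable stripped then some idx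
      else pvFindInsA rest (idx + 1) d'

def insert_use_import (text : String) (shape : String) : String :=
  let needed := pvNeeded shape
  -- short-circuit: 'for line in text.splitlines(): if line.strip() == needed: return text'
  if (PySem.Chars.splitlines text.toList).any (fun l => PySem.Chars.strip l == needed) then text
  else
    let lines := pvSplitKeep text.toList []
    match pvFindUseA lines 0 0 with
    | some idx => String.ofList (PySem.List.insert lines (idx : Int) (needed ++ ['\n'])).flatten
    | none =>
        match pvFindInsA lines 0 0 with
        | some idx => String.ofList (PySem.List.insert lines (idx : Int) (needed ++ ['\n', '\n'])).flatten
        | none => ""   -- Python raises RuntimeError here; excluded by Pre_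

-- ===== PORT B =====

-- B's single pass: one depth-walk recording (first_use, first_insert), each set only once,
-- breaking as soon as first_use is set
def pvScanB : List (List Char) → Nat → Int → Option Nat → Option Nat → Option Nat × Option Nat
  | [], _, _, fu, fi => (fu, fi)
  | line :: rest, idx, depth, fu, fi =>
      let stripped := PySem.Chars.strip line
      let d' := pvBrace line depth
      if depth ≠ 0 then pvScanB rest (idx + 1) d' fu fi
      else
        let fu' := if fu.isNone && PySem.Chars.startswith stripped pvUseCrate then some idx else fu
        let fi' := if fi.isNone && pvInsertable stripped then some idx else fi
        if fu'.isSome then (fu', fi')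
        else pvScanB rest (idx + 1) d' fu' fi'

def insert_use_import_alt (text : String) (shape : String) : String :=
  let needed := pvNeeded shape
  if (PySem.Chars.splitlines text.toList).any (fun l => PySem.Chars.strip l == needed) then text
  else
    let lines := pvSplitKeep text.toList []
    match pvScanB lines 0 0 none none with
    | (some idx, _) => String.ofList (PySem.List.insert lines (idx : Int) (needed ++ ['\n'])).flatten
    | (none, some idx) => String.ofList (PySem.List.insert lines (idx : Int) (needed ++ ['\n', '\n'])).flatten
    | (none, none) => ""   -- Python raises RuntimeError here; excluded by Pre_

-- ===== PRECONDITION & SPEC =====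

-- Pre_ excludes exactly the inputs on which A raises RuntimeError: the import is not already
-- present and no line that starts at cumulative brace-depth 0 is a non-empty non-comment line.
def Pre_insert_use_import (text : String) (shape : String) : Prop :=
  let lines := PySem.Chars.splitlines text.toList
  (∃ l ∈ lines, PySem.Chars.strip l = pvNeeded shape) ∨
  (∃ i < lines.length, pvBrace (lines.take i).flatten 0 = 0 ∧
      pvInsertable (PySem.Chars.strip (lines.getD i [])) = true)
instance (text : String) (shape : String) : Decidable (Pre_insert_use_import text shape) := by
  unfold Pre_insert_use_import; infer_instance

def pvWitness_insert_use_import : String × String := ("fn main() {}\n", "tool")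

def Spec_insert_use_import (text : String) (shape : String) (out : String) : Prop := out = insert_use_import_alt text shape
instance (text : String) (shape : String) (out : String) : Decidable (Spec_insert_use_import text shape out) := by unfold Spec_insert_use_import; infer_instance

-- ===== CLAIM (what is proved, stated in full; the proofs are below) =====
def Claim_equal_insert_use_import : Prop := ∀ (text : String) (shape : String), Dom_insert_use_import text shape → Pre_insert_use_import text shape → Spec_insert_use_import text shape (insert_use_import text shape)

-- ===== LEMMAS AND PROOFS =====

-- B's single pass computes A's two walks: its first component is A's first walk (seeded through
-- fu), and whenever that comes out none its second component is A's second walk (seeded through fi).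
theorem pvScanB_spec (lines : List (List Char)) :
    ∀ (idx : Nat) (depth : Int) (fu fi : Option Nat),
      (pvScanB lines idx depth fu fi).1 = (fu.or (pvFindUseA lines idx depth)) ∧
      ((pvScanB lines idx depth fu fi).1 = none →
        (pvScanB lines idx depth fu fi).2 = (fi.or (pvFindInsA lines idx depth))) := by
  induction lines with
  | nil => intro idx depth fu fi; simp [pvScanB, pvFindUseA, pvFindInsA]
  | cons line rest ih =>
      intro idx depth fu fi
      by_cases hd : depth = 0
      · cases hu : PySem.Chars.startswith (PySem.Chars.strip line) pvUseCrate with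
        | true =>
            cases fu with
            | some u =>
                constructor
                · simp [pvScanB, pvFindUseA, hd, hu]
                · intro hn; exfalso
                  simp [pvScanB, hd, hu] at hn
            | none =>
                constructor
                · simp [pvScanB, pvFindUseA, hd, hu]
                · intro hn; exfalso
                  simp [pvScanB, hd, hu] at hn
        | false =>
            cases fu with
            | some u =>
                constructor
                · simp [pvScanB, pvFindUseA, hd, hu]
                · intro hn; exfalso
                  simp [pvScanB, hd, hu] at hn
            | none =>
                have step : ∀ fi' : Option Nat,
                    pvScanB (line :: rest) idx depth none fi' =
                      pvScanB rest (idx + 1) (pvBrace line depth) none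
                        (if fi'.isNone && pvInsertable (PySem.Chars.strip line) then some idx else fi') := by
                  intro fi'; simp [pvScanB, hd, hu]
                cases fi with
                | some v =>
                    have hstep := step (some v)
                    simp only [Option.isNone_some, Bool.false_and, if_neg, Bool.false_eq_true,
                      not_false_iff] at hstep
                    rcases ih (idx + 1) (pvBrace line depth) none (some v) with ⟨h1, h2⟩
                    refine ⟨?_, ?_⟩
                    · rw [hstep, h1]; simp [pvFindUseA, hd, hu]
                    · intro hn; rw [hstep] at hn ⊢; rw [h2 hn]; simp
                | none =>
                    have hstep := step none
                    cases hins : pvInsertable (PySem.Chars.strip line) with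
                    | true =>
                        simp only [hins, Option.isNone_none, Bool.true_and, if_pos] at hstep
                        rcases ih (idx + 1) (pvBrace line depth) none (some idx) with ⟨h1, h2⟩
                        refine ⟨?_, ?_⟩
                        · rw [hstep, h1]; simp [pvFindUseA, hd, hu]
                        · intro hn; rw [hstep] at hn ⊢; rw [h2 hn]
                          simp [pvFindInsA, hd, hins]
                    | false =>
                        simp only [hins, Option.isNone_none, Bool.and_false,
                          if_neg, Bool.false_eq_true, not_false_iff] at hstep
                        rcases ih (idx + 1) (pvBrace line depth) none none with ⟨h1, h2⟩
                        refine ⟨?_, ?_⟩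
                        · rw [hstep, h1]; simp [pvFindUseA, hd, hu]
                        · intro hn; rw [hstep] at hn ⊢; rw [h2 hn]
                          simp [pvFindInsA, hd, hins]
      · have hstep : pvScanB (line :: rest) idx depth fu fi =
            pvScanB rest (idx + 1) (pvBrace line depth) fu fi := by
          simp [pvScanB, hd]
        rcases ih (idx + 1) (pvBrace line depth) fu fi with ⟨h1, h2⟩
        refine ⟨?_, ?_⟩
        · rw [hstep, h1]; simp [pvFindUseA, hd]
        · intro hn; rw [hstep] at hn ⊢; rw [h2 hn]; simp [pvFindInsA, hd]

-- ===== VERDICT (by name: the statement is the Claim_ definition above) =====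
theorem insert_use_import_spec : Claim_equal_insert_use_import := by
  intro text shape _ _
  unfold Spec_insert_use_import insert_use_import insert_use_import_alt
  by_cases hsc : (PySem.Chars.splitlines text.toList).any
      (fun l => PySem.Chars.strip l == pvNeeded shape) = true
  · simp [hsc]
  · simp only [hsc, Bool.false_eq_true, if_false]
    rcases pvScanB_spec (pvSplitKeep text.toList []) 0 0 none none with ⟨h1, h2⟩
    simp only [Option.none_or] at h1 h2
    rcases hp : pvScanB (pvSplitKeep text.toList []) 0 0 none none with ⟨a, b⟩
    rw [hp] at h1 h2
    cases hu : pvFindUseA (pvSplitKeep text.toList []) 0 0 with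
    | some idx =>
        have ha : a = some idx := by have h := h1; rw [hu] at h; exact h
        simp [ha]
    | none =>
        have ha : a = none := by have h := h1; rw [hu] at h; exact h
        have hb : b = pvFindInsA (pvSplitKeep text.toList []) 0 0 := h2 ha
        cases hi : pvFindInsA (pvSplitKeep text.toList []) 0 0 with
        | some idx => simp [ha, hb, hi]
        | none => simp [ha, hb, hi]
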